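-- pv_equiv track=rewrite | github.com/SurTan02/Tucil3_13520059 | src/solver.py | finished
-- ===== SOURCE A (Python) =====
-- def finished(mtrx):
--     idx = 1
--     for x in mtrx:
--         for y  in x:
--             if (y != idx):
--                 return False
--             idx+=1
--     return True
-- ===== SOURCE B (Python) =====
-- def finished(mtrx):
--     # The flattened matrix is 1,2,3,... iff: the first element is 1, every
--     # adjacent pair inside a row differs by exactly +1, and each row starts
--     # one past the last element of the previous (nonempty) row.
--     rows = [r for r in mtrx if r]
--     if not rows:
--         return True
--     ok_start = rows[0][0] == 1
--     ok_rows = all(all(b == a + 1 for a, b in zip(r, r[1:])) for r in rows)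
--     ok_join = all(s[0] == r[-1] + 1 for r, s in zip(rows, rows[1:]))
--     return ok_start and ok_rows and ok_join
-- ===== Notes on version B (the rewrite author's own statement) =====
-- stated objective: alternative
-- what changed: Replaces A's global running-counter scan by a local-difference characterization: B drops empty rows, then checks the first element is 1, every adjacent pair within a row differs by +1 (zip of row with its tail), and each row starts one past the previous row's last element.
import Mathlib
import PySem

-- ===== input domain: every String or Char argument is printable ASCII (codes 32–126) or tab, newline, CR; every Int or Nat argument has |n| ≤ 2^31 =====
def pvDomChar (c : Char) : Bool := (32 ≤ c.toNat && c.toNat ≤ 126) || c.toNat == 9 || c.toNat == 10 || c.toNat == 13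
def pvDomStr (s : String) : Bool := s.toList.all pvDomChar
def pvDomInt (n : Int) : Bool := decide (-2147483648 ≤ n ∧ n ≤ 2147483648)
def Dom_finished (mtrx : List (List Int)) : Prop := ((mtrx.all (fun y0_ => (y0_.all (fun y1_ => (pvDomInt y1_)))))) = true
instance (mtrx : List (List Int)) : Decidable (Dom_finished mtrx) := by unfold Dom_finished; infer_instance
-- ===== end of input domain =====

-- B replaces A's running-counter scan by a local-difference characterization
-- (first element is 1, +1 steps inside rows, each row starts after the previous).

-- ===== PORT A =====
-- inner 'for y in x' loop: returns none on the early 'return False', else the updated idx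
def finishedRow : Int → List Int → Option Int
  | idx, [] => some idx
  | idx, y :: ys => if y ≠ idx then none else finishedRow (idx + 1) ys

-- outer 'for x in mtrx' loop threading idx
def finishedGo : Int → List (List Int) → Bool
  | _, [] => true
  | idx, x :: xs =>
    match finishedRow idx x with
    | none => false
    | some idx' => finishedGo idx' xs

def finished (mtrx : List (List Int)) : Bool := finishedGo 1 mtrx

-- ===== PORT B =====
-- all(b == a + 1 for a, b in zip(r, r[1:]))
def consecB (r : List Int) : Bool := (r.zip r.tail).all (fun p => p.2 == p.1 + 1)
-- all(s[0] == r[-1] + 1 for r, s in zip(rows, rows[1:]))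
def joinB (rows : List (List Int)) : Bool :=
  (rows.zip rows.tail).all (fun p => p.2.headD 0 == p.1.getLastD 0 + 1)

def finished_alt (mtrx : List (List Int)) : Bool :=
  match mtrx.filter (fun r => !r.isEmpty) with
  | [] => true
  | r0 :: rest => (r0.headD 0 == 1) && (r0 :: rest).all consecB && joinB (r0 :: rest)

-- ===== PRECONDITION & SPEC =====
def Spec_finished (mtrx : List (List Int)) (out : Bool) : Prop := out = finished_alt mtrx
instance (mtrx : List (List Int)) (out : Bool) : Decidable (Spec_finished mtrx out) := by unfold Spec_finished; infer_instance

-- ===== CLAIM (what is proved, stated in full; the proofs are below) =====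
def Claim_equal_finished : Prop := ∀ (mtrx : List (List Int)), Dom_finished mtrx → Spec_finished mtrx (finished mtrx)

-- ===== LEMMAS AND PROOFS =====

-- expected sequence idx, idx+1, …, idx+n-1
def pvExpect : Int → Nat → List Int
  | _, 0 => []
  | idx, n + 1 => idx :: pvExpect (idx + 1) n

theorem pvExpect_length (idx : Int) (n : Nat) : (pvExpect idx n).length = n := by
  induction n generalizing idx with
  | zero => rfl
  | succ n ih => simp [pvExpect, ih]

theorem pvExpect_append (idx : Int) (a b : Nat) :
    pvExpect idx (a + b) = pvExpect idx a ++ pvExpect (idx + a) b := by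
  induction a generalizing idx with
  | zero => simp [pvExpect]
  | succ a ih =>
    have : a + 1 + b = (a + b) + 1 := by omega
    rw [this]
    simp only [pvExpect, ih (idx + 1), List.cons_append]
    congr 3
    push_cast
    ring

theorem finishedRow_char (row : List Int) (idx : Int) :
    finishedRow idx row = if row = pvExpect idx row.length then some (idx + row.length) else none := by
  induction row generalizing idx with
  | nil => simp [finishedRow, pvExpect]
  | cons y ys ih =>
    simp only [finishedRow]
    by_cases h : y = idx
    · subst h
      simp only [ne_eq, not_true_eq_false, ite_false]
      rw [ih (y + 1)]
      by_cases h2 : ys = pvExpect (y + 1) ys.length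
      · rw [if_pos h2, List.length_cons, if_pos (by rw [pvExpect, ← h2])]
        congr 1
        push_cast
        ring
      · rw [if_neg h2, List.length_cons, if_neg (by rw [pvExpect]; simpa using h2)]
    · rw [if_pos h, List.length_cons, if_neg]
      rw [pvExpect]
      intro hc
      exact h (List.head_eq_of_cons_eq hc)

theorem finishedGo_char (rows : List (List Int)) (idx : Int) :
    finishedGo idx rows =
      decide (rows.flatMap (fun x => x) = pvExpect idx (rows.flatMap (fun x => x)).length) := by
  induction rows generalizing idx with
  | nil => simp [finishedGo, pvExpect]
  | cons x xs ih =>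
    simp only [finishedGo, finishedRow_char]
    have hsplit : pvExpect idx ((x ++ xs.flatMap (fun x => x)).length)
        = pvExpect idx x.length ++ pvExpect (idx + x.length) (xs.flatMap (fun x => x)).length := by
      rw [List.length_append, pvExpect_append]
    by_cases h : x = pvExpect idx x.length
    · rw [if_pos h]
      show finishedGo (idx + x.length) xs = _
      rw [ih]
      simp only [List.flatMap_cons, hsplit]
      by_cases h2 : xs.flatMap (fun x => x) = pvExpect (idx + x.length) (xs.flatMap (fun x => x)).length
      · rw [decide_eq_true h2, decide_eq_true (by rw [← h2, ← h])]
      · rw [decide_eq_false h2, decide_eq_false]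
        intro hc
        exact h2 (List.append_inj_right hc (by rw [pvExpect_length]))
    · rw [if_neg h]
      show false = _
      rw [eq_comm, decide_eq_false_iff_not]
      simp only [List.flatMap_cons, hsplit]
      intro hc
      exact h (List.append_inj_left hc (by rw [pvExpect_length]))

-- consecB on a two-or-more-element list peels one adjacent pair
theorem consecB_cons (y z : Int) (zs : List Int) :
    consecB (y :: z :: zs) = ((z == y + 1) && consecB (z :: zs)) := rfl

-- B-side: a nonempty row equals pvExpect idx (its length) iff it starts at idx and is consecutive
theorem row_char (r : List Int) (h : r ≠ []) (idx : Int) :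
    r = pvExpect idx r.length ↔ (r.headD 0 = idx ∧ consecB r = true) := by
  induction r generalizing idx with
  | nil => exact absurd rfl h
  | cons y ys ih =>
    cases ys with
    | nil =>
      rw [show pvExpect idx [y].length = [idx] from rfl]
      simp [consecB]
    | cons z zs =>
      rw [show (y :: z :: zs).length = (z :: zs).length + 1 from rfl,
        show pvExpect idx ((z :: zs).length + 1) = idx :: pvExpect (idx + 1) (z :: zs).length from rfl,
        List.cons_eq_cons, ih (by simp) (idx + 1), consecB_cons]
      simp only [List.headD_cons, Bool.and_eq_true, beq_iff_eq]
      constructor <;> rintro ⟨h1, h2, h3⟩ <;> exact ⟨h1, by omega, h3⟩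

theorem pvExpect_getLastD (idx : Int) (n : Nat) (d : Int) :
    (pvExpect idx (n + 1)).getLastD d = idx + n := by
  induction n generalizing idx d with
  | zero => simp [pvExpect]
  | succ m ih =>
    rw [show pvExpect idx (m + 1 + 1) = idx :: pvExpect (idx + 1) (m + 1) from rfl,
      List.getLastD_cons, ih]
    push_cast
    ring

theorem pvExpect_getLastD' (idx : Int) (n : Nat) (h : n ≠ 0) (d : Int) :
    (pvExpect idx n).getLastD d = idx + n - 1 := by
  obtain ⟨m, rfl⟩ := Nat.exists_eq_succ_of_ne_zero h
  rw [pvExpect_getLastD]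
  push_cast
  ring

-- core: B's three checks on a nonempty list of nonempty rows ⟺ flattening is pvExpect idx _
theorem altGo_char (r0 : List Int) (rest : List (List Int))
    (h : ∀ r ∈ r0 :: rest, r ≠ []) (idx : Int) :
    ((r0.headD 0 == idx) && (r0 :: rest).all consecB && joinB (r0 :: rest)) =
      decide ((r0 :: rest).flatMap (fun x => x) =
        pvExpect idx ((r0 :: rest).flatMap (fun x => x)).length) := by
  induction rest generalizing r0 idx with
  | nil =>
    have hr := row_char r0 (h r0 (by simp)) idx
    simp only [List.flatMap_cons, List.flatMap_nil, List.append_nil, joinB, List.all_cons,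
      List.all_nil, Bool.and_true]
    rw [Bool.eq_iff_iff]
    simp only [Bool.and_eq_true, beq_iff_eq, decide_eq_true_iff]
    rw [hr]
    tauto
  | cons s ss ih =>
    have hr0 : r0 ≠ [] := h r0 (by simp)
    have hrest : ∀ r ∈ s :: ss, r ≠ [] := fun r hr => h r (by simp [hr])
    have hIH := ih s hrest (idx + r0.length)
    have hr := row_char r0 hr0 idx
    rw [Bool.eq_iff_iff]
    rw [show joinB (r0 :: s :: ss) = ((s.headD 0 == r0.getLastD 0 + 1) && joinB (s :: ss)) from rfl]
    simp only [List.all_cons, Bool.and_eq_true, beq_iff_eq, decide_eq_true_iff]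
    have hfold : (r0 :: s :: ss).flatMap (fun x => x) = r0 ++ (s :: ss).flatMap (fun x => x) := by
      simp
    have hsplit : pvExpect idx ((r0 ++ (s :: ss).flatMap (fun x => x)).length)
        = pvExpect idx r0.length ++ pvExpect (idx + r0.length) ((s :: ss).flatMap (fun x => x)).length := by
      rw [List.length_append, pvExpect_append]
    rw [Bool.eq_iff_iff] at hIH
    simp only [List.all_cons, Bool.and_eq_true, beq_iff_eq, decide_eq_true_iff] at hIH
    have hr0len : r0.length ≠ 0 := by
      cases r0 with
      | nil => exact absurd rfl hr0
      | cons a l => simp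
    constructor
    · rintro ⟨⟨hhead, hc0, hcs, hcss⟩, hj, hjs⟩
      have hr0eq : r0 = pvExpect idx r0.length := hr.mpr ⟨hhead, hc0⟩
      have hlast : r0.getLastD 0 = idx + r0.length - 1 := by
        conv_lhs => rw [hr0eq]
        exact pvExpect_getLastD' idx r0.length hr0len 0
      have hflat : (s :: ss).flatMap (fun x => x)
          = pvExpect (idx + r0.length) ((s :: ss).flatMap (fun x => x)).length :=
        hIH.mp ⟨⟨by omega, hcs, hcss⟩, hjs⟩
      rw [hfold, hsplit, ← hr0eq, ← hflat]
    · intro hflatAll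
      rw [hfold, hsplit] at hflatAll
      have hlen : r0.length = (pvExpect idx r0.length).length := (pvExpect_length idx r0.length).symm
      have hr0eq : r0 = pvExpect idx r0.length := List.append_inj_left hflatAll hlen
      have hresteq : (s :: ss).flatMap (fun x => x)
          = pvExpect (idx + r0.length) ((s :: ss).flatMap (fun x => x)).length :=
        List.append_inj_right hflatAll hlen
      obtain ⟨hhead, hc0⟩ := hr.mp hr0eq
      have hlast : r0.getLastD 0 = idx + r0.length - 1 := by
        conv_lhs => rw [hr0eq]
        exact pvExpect_getLastD' idx r0.length hr0len 0
      obtain ⟨⟨hsh, hcs, hcss⟩, hjss⟩ := hIH.mpr hresteq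
      exact ⟨⟨hhead, hc0, hcs, hcss⟩, by omega, hjss⟩

-- dropping empty rows does not change the flattening
theorem filter_flatMap (mtrx : List (List Int)) :
    (mtrx.filter (fun r => !r.isEmpty)).flatMap (fun x => x) = mtrx.flatMap (fun x => x) := by
  induction mtrx with
  | nil => rfl
  | cons r rs ih =>
    cases r with
    | nil => simpa [List.filter] using ih
    | cons a l => simp [List.filter, ih]

theorem finished_alt_char (mtrx : List (List Int)) :
    finished_alt mtrx =
      decide (mtrx.flatMap (fun x => x) = pvExpect 1 (mtrx.flatMap (fun x => x)).length) := by
  rcases hrows : mtrx.filter (fun r => !r.isEmpty) with _ | ⟨r0, rest⟩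
  · have hflat : mtrx.flatMap (fun x => x) = [] := by
      rw [← filter_flatMap, hrows]
      rfl
    simp only [finished_alt, hrows, hflat]
    rw [show pvExpect 1 ([] : List Int).length = [] from rfl]
    simp
  · have hne : ∀ r ∈ r0 :: rest, r ≠ [] := by
      intro r hr
      rw [← hrows] at hr
      have := List.of_mem_filter hr
      simpa using this
    calc finished_alt mtrx
        = ((r0.headD 0 == 1) && (r0 :: rest).all consecB && joinB (r0 :: rest)) := by
          simp only [finished_alt, hrows]
      _ = _ := by rw [altGo_char r0 rest hne 1, ← hrows, filter_flatMap]

-- ===== VERDICT (by name: the statement is the Claim_ definition above) =====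
theorem finished_spec : Claim_equal_finished := by
  intro mtrx _
  unfold Spec_finished finished
  rw [finishedGo_char, finished_alt_char]
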